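-- pv_equiv track=rewrite | github.com/the-ride-never-ends/augmentoolkit-node-edition-mk-3 | ComfyUI/custom_nodes/augmentoolkit_async_2_functions.py | identify_duplicates
-- ===== SOURCE A (Python) =====
-- from typing import Any, List, Tuple, Union
--
-- def identify_duplicates(
--     tuples: List[Tuple[str, str, str, str]]
-- ) -> List[Tuple[str, str, str, str]]:
--     # Create a dictionary to hold questions with the same first N characters
--     question_dict = {}
--
--     # Iterate through each tuple and categorize them by the first N characters of the question
--     for q_tuple in tuples:
--         question = q_tuple[0]
--         # Get the first N characters of the question
--         prefix = question[:15]
--         # Add the tuple to the list of tuples with the same prefix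
--         if prefix in question_dict:
--             question_dict[prefix].append(q_tuple)
--         else:
--             question_dict[prefix] = [q_tuple]
--
--     matching_questions = [
--         q for q_list in question_dict.values() if len(q_list) == 1 for q in q_list
--     ]
--     selected_from_duplicates = [
--         q_list[0] for q_list in question_dict.values() if len(q_list) > 1
--     ]
--
--     return matching_questions + selected_from_duplicates
-- ===== SOURCE B (Python) =====
-- def identify_duplicates(tuples):
--     # One pass counting question prefixes, then two passes over the original
--     # list: singletons first, then the first occurrence of each duplicated prefix.
--     counts = {}
--     for t in tuples:
--         p = t[0][:15]
--         counts[p] = counts.get(p, 0) + 1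
--     matching_questions = [t for t in tuples if counts[t[0][:15]] == 1]
--     seen = set()
--     selected_from_duplicates = []
--     for t in tuples:
--         p = t[0][:15]
--         if counts[p] > 1 and p not in seen:
--             seen.add(p)
--             selected_from_duplicates.append(t)
--     return matching_questions + selected_from_duplicates
-- ===== Notes on version B (the rewrite author's own statement) =====
-- stated objective: alternative
-- what changed: Instead of grouping all tuples into a dict of lists and flattening its values, B only counts prefixes in one pass and then makes two passes over the original list: it filters out the tuples with a unique prefix, and picks the first occurrence of each duplicated prefix with a seen-set.
import Mathlib
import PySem

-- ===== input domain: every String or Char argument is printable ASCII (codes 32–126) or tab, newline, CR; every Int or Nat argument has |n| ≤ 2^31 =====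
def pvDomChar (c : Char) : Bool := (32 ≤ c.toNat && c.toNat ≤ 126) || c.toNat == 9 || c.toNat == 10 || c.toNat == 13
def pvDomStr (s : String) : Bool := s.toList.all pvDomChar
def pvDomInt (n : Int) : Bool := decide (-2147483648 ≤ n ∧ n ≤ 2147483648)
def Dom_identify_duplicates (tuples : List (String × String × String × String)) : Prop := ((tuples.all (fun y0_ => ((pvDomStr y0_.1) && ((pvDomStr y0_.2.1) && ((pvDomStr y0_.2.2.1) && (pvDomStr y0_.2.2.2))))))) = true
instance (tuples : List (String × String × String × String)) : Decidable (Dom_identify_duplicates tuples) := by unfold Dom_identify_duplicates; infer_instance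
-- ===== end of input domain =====

-- B replaces A's dict-of-grouped-lists (built, then flattened twice) by a prefix counter plus
-- two passes over the original list (singletons, then first occurrence of each duplicated prefix);
-- same result, same O(n) cost — objective: alternative decomposition.

-- ===== PORT A =====
-- question[:15], used by both ports
def pvPfx (t : String × String × String × String) : String := PySem.Str.slice t.1 none (some 15)

def identify_duplicates (tuples : List (String × String × String × String)) : List (String × String × String × String) :=
  let question_dict : PySem.Dict String (List (String × String × String × String)) :=
    tuples.foldl (fun d q_tuple =>
      let p := pvPfx q_tuple
      if d.contains p then d.insert p (d.getD p [] ++ [q_tuple])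
      else d.insert p [q_tuple]) PySem.Dict.empty
  let matching_questions :=
    (question_dict.values.filter (fun q_list => q_list.length == 1)).flatMap (fun q_list => q_list)
  let selected_from_duplicates :=
    (question_dict.values.filter (fun q_list => decide (1 < q_list.length))).map
      (fun q_list => PySem.List.pyGetD q_list 0 ("", "", "", ""))
  matching_questions ++ selected_from_duplicates

-- ===== PORT B =====
def identify_duplicates_alt (tuples : List (String × String × String × String)) : List (String × String × String × String) :=
  let counts : PySem.Dict String Int :=
    tuples.foldl (fun d t => let p := pvPfx t; d.insert p (d.getD p 0 + 1)) PySem.Dict.empty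
  let matching_questions :=
    tuples.filter (fun t => counts.getD (pvPfx t) 0 == 1)
  let sel :=
    tuples.foldl (fun (s : PySem.Set String × List (String × String × String × String)) t =>
      let p := pvPfx t
      if 1 < counts.getD p 0 ∧ PySem.Set.contains s.1 p = false then (PySem.Set.add s.1 p, s.2 ++ [t])
      else s) (PySem.Set.empty, [])
  matching_questions ++ sel.2

-- ===== PRECONDITION & SPEC =====
def Spec_identify_duplicates (tuples : List (String × String × String × String)) (out : List (String × String × String × String)) : Prop := out = identify_duplicates_alt tuples
instance (tuples : List (String × String × String × String)) (out : List (String × String × String × String)) : Decidable (Spec_identify_duplicates tuples out) := by unfold Spec_identify_duplicates; infer_instance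

-- ===== CLAIM (what is proved, stated in full; the proofs are below) =====
def Claim_equal_identify_duplicates : Prop := ∀ (tuples : List (String × String × String × String)), Dom_identify_duplicates tuples → Spec_identify_duplicates tuples (identify_duplicates tuples)

-- ===== LEMMAS AND PROOFS =====

-- A's grouping loop is the canonical 'modify' loop
lemma pvA_fold_eq_modify (tuples : List (String × String × String × String)) :
    tuples.foldl (fun d q_tuple =>
      let p := pvPfx q_tuple
      if d.contains p then d.insert p (d.getD p [] ++ [q_tuple])
      else d.insert p [q_tuple]) PySem.Dict.empty
    = tuples.foldl (fun d t => d.modify (pvPfx t) [] (· ++ [t])) PySem.Dict.empty := by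
  apply PySem.List.foldl_congr_mem
  intro d t _
  by_cases h : d.contains (pvPfx t) = true
  · simp [h, PySem.Dict.modify]
  · simp only [Bool.not_eq_true] at h
    simp [h, PySem.Dict.modify, PySem.Dict.getD_of_not_contains d [] h]

lemma pvA_getD (tuples : List (String × String × String × String)) (p : String) :
    (tuples.foldl (fun d t => d.modify (pvPfx t) [] (· ++ [t])) PySem.Dict.empty).getD p []
    = tuples.filter (fun t => pvPfx t == p) := by
  have h := PySem.Dict.getD_foldl_modify_append (tuples.map (fun t => (pvPfx t, t)))
    (PySem.Dict.empty (κ := String) (ν := List (String × String × String × String))) p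
  rw [List.foldl_map, List.filter_map] at h
  simpa [Function.comp_def, PySem.Dict.getD_empty, List.map_map] using h

lemma pvA_keys (tuples : List (String × String × String × String)) :
    (tuples.foldl (fun d t => d.modify (pvPfx t) [] (· ++ [t])) PySem.Dict.empty).keys
    = PySem.Set.ofList (tuples.map pvPfx) := by
  have h := PySem.Dict.keys_foldl_modify_key tuples pvPfx []
    (fun _ t => (· ++ [t])) (PySem.Dict.empty (κ := String) (ν := List (String × String × String × String)))
  simpa [PySem.Dict.keys_empty, PySem.Set.update_nil_left] using h

lemma pvB_counts (tuples : List (String × String × String × String)) (p : String) :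
    (tuples.foldl (fun d t => d.insert (pvPfx t) (d.getD (pvPfx t) 0 + 1)) PySem.Dict.empty).getD p 0
    = (((tuples.map pvPfx).count p : Nat) : Int) := by
  have h := PySem.Dict.getD_foldl_insert_add_one (tuples.map pvPfx)
    (PySem.Dict.empty (κ := String) (ν := Int)) p
  rw [List.foldl_map] at h
  simpa [PySem.Dict.getD_empty] using h

-- count of a prefix = number of tuples with that prefix
lemma pvCount_eq_countP (tuples : List (String × String × String × String)) (p : String) :
    (tuples.map pvPfx).count p = tuples.countP (fun t => pvPfx t == p) := by
  rw [List.count_eq_countP, List.countP_map]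
  rfl

-- the singleton comprehension: flattening the singleton groups in key order is a filter of the list
lemma pvSingles_gen (l : List (String × String × String × String)) (c : String → Bool)
    (H : ∀ p, c p = true → l.countP (fun t => pvPfx t == p) ≤ 1) :
    ((PySem.Set.ofList (l.map pvPfx)).filter c).flatMap (fun p => l.filter (fun t => pvPfx t == p))
    = l.filter (fun t => c (pvPfx t)) := by
  induction l with
  | nil => simp
  | cons t ts ih =>
    rw [List.map_cons, PySem.Set.ofList_cons]
    by_cases hc : c (pvPfx t) = true
    · have h1 := H (pvPfx t) hc
      rw [List.countP_cons] at h1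
      simp only [BEq.rfl, if_pos] at h1
      have hcount : ts.countP (fun u => pvPfx u == pvPfx t) = 0 := by omega
      have hnot : pvPfx t ∉ ts.map pvPfx := by
        intro hm
        obtain ⟨u, hu, hup⟩ := List.mem_map.mp hm
        have := (List.countP_eq_zero.mp hcount) u hu
        simp [hup] at this
      have hdiscard : (PySem.Set.ofList (ts.map pvPfx)).discard (pvPfx t)
          = PySem.Set.ofList (ts.map pvPfx) := by
        apply List.filter_eq_self.mpr
        intro p hp
        have hmem : p ∈ ts.map pvPfx := (PySem.Set.mem_ofList _ _).mp hp
        have : p ≠ pvPfx t := fun h => hnot (h ▸ hmem)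
        simp [this]
      rw [hdiscard, List.filter_cons_of_pos hc, List.flatMap_cons,
        List.filter_cons_of_pos (by simp), List.filter_eq_nil_iff.mpr
          (by intro u hu; have := (List.countP_eq_zero.mp hcount) u hu; simpa using this)]
      have hrest : ((PySem.Set.ofList (ts.map pvPfx)).filter c).flatMap
            (fun p => (t :: ts).filter (fun u => pvPfx u == p))
          = ((PySem.Set.ofList (ts.map pvPfx)).filter c).flatMap
            (fun p => ts.filter (fun u => pvPfx u == p)) := by
        apply List.flatMap_congr
        intro p hp
        have hmem : p ∈ ts.map pvPfx := (PySem.Set.mem_ofList _ _).mp (List.mem_of_mem_filter hp)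
        have hne : pvPfx t ≠ p := by intro h; exact hnot (h ▸ hmem)
        rw [List.filter_cons_of_neg (by simp [hne])]
      rw [hrest, ih (fun p hp => by
        have := H p hp
        rw [List.countP_cons] at this
        omega)]
      simp [hc]
    · rw [List.filter_cons_of_neg hc]
      have hfilter : ((PySem.Set.ofList (ts.map pvPfx)).discard (pvPfx t)).filter c
          = (PySem.Set.ofList (ts.map pvPfx)).filter c := by
        rw [PySem.Set.discard, List.filter_filter]
        apply List.filter_congr
        intro p _
        by_cases hp : p = pvPfx t
        · subst hp; simp [hc]
        · simp [hp]
      rw [hfilter]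
      have hrest : ((PySem.Set.ofList (ts.map pvPfx)).filter c).flatMap
            (fun p => (t :: ts).filter (fun u => pvPfx u == p))
          = ((PySem.Set.ofList (ts.map pvPfx)).filter c).flatMap
            (fun p => ts.filter (fun u => pvPfx u == p)) := by
        apply List.flatMap_congr
        intro p hp
        have hcp : c p = true := List.of_mem_filter hp
        have hne : pvPfx t ≠ p := by intro h; rw [h] at hc; exact hc hcp
        rw [List.filter_cons_of_neg (by simp [hne])]
      rw [hrest, ih (fun p hp => by
        have := H p hp
        rw [List.countP_cons] at this
        omega)]
      simp [hc]

set_option maxHeartbeats 1000000 in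
-- the seen-set loop picks, in first-occurrence order, the head of each selected group
lemma pvSel_gen (c : String → Bool) (l : List (String × String × String × String)) :
    ∀ (seen : PySem.Set String) (acc : List (String × String × String × String)),
    (l.foldl (fun s t =>
        let p := pvPfx t
        if c p = true ∧ PySem.Set.contains s.1 p = false then (PySem.Set.add s.1 p, s.2 ++ [t]) else s)
      (seen, acc)).2
    = acc ++ ((PySem.Set.ofList (l.map pvPfx)).filter
          (fun p => c p && !(PySem.Set.contains seen p))).map
        (fun p => PySem.List.pyGetD (l.filter (fun t => pvPfx t == p)) 0 ("", "", "", "")) := by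
  induction l with
  | nil => intro seen acc; simp
  | cons t ts ih =>
    intro seen acc
    rw [List.map_cons, PySem.Set.ofList_cons, List.foldl_cons]
    by_cases h : c (pvPfx t) = true ∧ PySem.Set.contains seen (pvPfx t) = false
    · have h2' : pvPfx t ∉ seen := by simpa using h.2
      simp only [if_pos h]
      rw [ih (PySem.Set.add seen (pvPfx t)) (acc ++ [t])]
      rw [List.filter_cons_of_pos (by simp [h.1, h2']), List.map_cons,
        List.filter_cons_of_pos (by simp), PySem.List.pyGetD_zero_cons]
      have hadd : PySem.Set.add seen (pvPfx t) = seen ++ [pvPfx t] := by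
        rw [PySem.Set.add]; simp [h2']
      have hfilters : ((PySem.Set.ofList (ts.map pvPfx)).discard (pvPfx t)).filter
            (fun p => c p && !(PySem.Set.contains seen p))
          = (PySem.Set.ofList (ts.map pvPfx)).filter
            (fun p => c p && !(PySem.Set.contains (PySem.Set.add seen (pvPfx t)) p)) := by
        rw [PySem.Set.discard, List.filter_filter]
        apply List.filter_congr
        intro p _
        rw [hadd]
        simp only [PySem.Set.contains, List.contains_append]
        by_cases hp : p = pvPfx t
        · subst hp; simp
        · simp [hp, Bool.and_comm]
      rw [← hfilters]
      have hmaps : ∀ L : List String, (∀ p ∈ L, p ≠ pvPfx t) →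
          L.map (fun p => PySem.List.pyGetD ((t :: ts).filter (fun u => pvPfx u == p)) 0 ("", "", "", ""))
          = L.map (fun p => PySem.List.pyGetD (ts.filter (fun u => pvPfx u == p)) 0 ("", "", "", "")) := by
        intro L hL
        apply List.map_congr_left
        intro p hp
        rw [List.filter_cons_of_neg (by simp [Ne.symm (hL p hp)])]
      rw [hmaps _ (fun p hp => by
        have := List.mem_of_mem_filter hp
        rw [PySem.Set.discard] at this
        have := List.of_mem_filter this
        intro he; subst he; simp at this)]
      simp only [List.append_assoc, List.cons_append, List.nil_append]
    · simp only [if_neg h]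
      rw [ih seen acc]
      have himp : c (pvPfx t) = true → pvPfx t ∈ seen := by
        intro h1
        by_cases h2 : PySem.Set.contains seen (pvPfx t) = true
        · exact (PySem.Set.contains_iff _ _).mp h2
        · exact absurd ⟨h1, by simpa using h2⟩ h
      have hc0 : (c (pvPfx t) && !(PySem.Set.contains seen (pvPfx t))) = false := by
        by_cases h1 : c (pvPfx t) = true
        · simp [h1, himp h1]
        · simp only [Bool.not_eq_true] at h1; simp [h1]
      rw [List.filter_cons_of_neg (by simpa using himp)]
      have hfilter : ((PySem.Set.ofList (ts.map pvPfx)).discard (pvPfx t)).filter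
            (fun p => c p && !(PySem.Set.contains seen p))
          = (PySem.Set.ofList (ts.map pvPfx)).filter
            (fun p => c p && !(PySem.Set.contains seen p)) := by
        rw [PySem.Set.discard, List.filter_filter]
        apply List.filter_congr
        intro p _
        by_cases hp : p = pvPfx t
        · subst hp; rw [hc0]; simp
        · simp [hp]
      rw [hfilter]
      congr 1
      apply List.map_congr_left
      intro p hp
      have hcp := List.of_mem_filter hp
      have hne : pvPfx t ≠ p := by
        intro he; rw [← he] at hcp; rw [hcp] at hc0; simp at hc0
      rw [List.filter_cons_of_neg (by simp [hne])]

-- ===== VERDICT (by name: the statement is the Claim_ definition above) =====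
set_option maxHeartbeats 1000000 in
theorem identify_duplicates_spec : Claim_equal_identify_duplicates := by
  unfold Claim_equal_identify_duplicates Spec_identify_duplicates
  intro tuples _
  unfold identify_duplicates identify_duplicates_alt
  simp only [pvA_fold_eq_modify]
  have hnodup : (tuples.foldl (fun d t => d.modify (pvPfx t) [] (· ++ [t]))
      PySem.Dict.empty).keys.Nodup := by
    rw [pvA_keys]; exact PySem.Set.nodup_ofList _
  rw [PySem.Dict.values_eq_map_keys _ hnodup [], pvA_keys]
  have hG : ∀ p, (tuples.foldl (fun d t => d.modify (pvPfx t) [] (· ++ [t]))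
      PySem.Dict.empty).getD p [] = tuples.filter (fun t => pvPfx t == p) := pvA_getD tuples
  rw [List.map_congr_left (fun p _ => hG p)]
  rw [List.filter_map, List.filter_map, List.map_map, List.flatMap_map]
  simp only [Function.comp_def]
  -- singles side: rewrite A's key condition to a count condition and flatten
  have hcondA : (fun p => ((tuples.filter (fun t => pvPfx t == p)).length == 1))
      = fun p => ((tuples.map pvPfx).count p == 1) := by
    funext p
    rw [← List.countP_eq_length_filter, ← pvCount_eq_countP]
  rw [hcondA, pvSingles_gen tuples _ (fun p hp => by
    rw [← pvCount_eq_countP]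
    have : (tuples.map pvPfx).count p = 1 := by simpa using hp
    omega)]
  have hmatch : tuples.filter (fun t => ((tuples.map pvPfx).count (pvPfx t) == 1))
      = tuples.filter (fun t =>
          (tuples.foldl (fun d u => d.insert (pvPfx u) (d.getD (pvPfx u) 0 + 1))
            (PySem.Dict.empty : PySem.Dict String Int)).getD (pvPfx t) 0 == 1) := by
    apply List.filter_congr
    intro t _
    rw [pvB_counts]
    by_cases h : (tuples.map pvPfx).count (pvPfx t) = 1 <;> simp [h]
  rw [hmatch]
  -- selected side: the seen-set loop
  have hsel := pvSel_gen (fun p => decide (1 < ((tuples.map pvPfx).count p : Int))) tuples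
    PySem.Set.empty []
  have hfoldeq : tuples.foldl (fun (s : PySem.Set String × List (String × String × String × String)) t =>
        if 1 < (tuples.foldl (fun d u => d.insert (pvPfx u) (d.getD (pvPfx u) 0 + 1))
            (PySem.Dict.empty : PySem.Dict String Int)).getD (pvPfx t) 0 ∧ PySem.Set.contains s.1 (pvPfx t) = false
        then (PySem.Set.add s.1 (pvPfx t), s.2 ++ [t]) else s) (PySem.Set.empty, [])
      = tuples.foldl (fun (s : PySem.Set String × List (String × String × String × String)) t =>
        if (fun p => decide (1 < ((tuples.map pvPfx).count p : Int))) (pvPfx t) = true ∧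
            PySem.Set.contains s.1 (pvPfx t) = false
        then (PySem.Set.add s.1 (pvPfx t), s.2 ++ [t]) else s) (PySem.Set.empty, []) := by
    apply PySem.List.foldl_congr_mem
    intro s t _
    rw [pvB_counts]
    simp
  rw [hfoldeq, hsel]
  have hcondS : (fun p => decide (1 < (tuples.filter (fun t => pvPfx t == p)).length))
      = fun p => (decide (1 < ((tuples.map pvPfx).count p : Int)) &&
          !(PySem.Set.contains PySem.Set.empty p)) := by
    funext p
    simp only [PySem.Set.contains, PySem.Set.empty]
    rw [← List.countP_eq_length_filter, ← pvCount_eq_countP]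
    simp
  rw [hcondS]
  simp
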